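-- pv_equiv track=rewrite | github.com/orionewton/CodinGame | Easy/first_contact.py | indi
-- ===== SOURCE A (Python) =====
-- def indi(message, tab):
--     i = 1
--     while sum(tab) < len(message):
--         tab.append(i)
--         i += 1
--     while sum(tab) > len(message):
--         tab[-1] -= 1
--     return tab
-- ===== SOURCE B (Python) =====
-- def indi(message, tab):
--     # Return-value re-implementation: running sum + direct overshoot subtraction
--     # (A mutates tab in place; B leaves tab untouched and returns a fresh list).
--     L = len(message)
--     s = sum(tab)
--     k = 0
--     while s < L:
--         k += 1
--         s += k
--     res = tab + list(range(1, k + 1))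
--     if s > L:
--         res[-1] -= s - L
--     return res
-- ===== Notes on version B (the rewrite author's own statement) =====
-- stated objective: faster
-- what changed: B keeps one running sum while choosing how many integers 1..k to append and subtracts the overshoot from the last element in one step, instead of A's re-summing the whole list on every iteration of both loops and decrementing the last element by one at a time.
import Mathlib
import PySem

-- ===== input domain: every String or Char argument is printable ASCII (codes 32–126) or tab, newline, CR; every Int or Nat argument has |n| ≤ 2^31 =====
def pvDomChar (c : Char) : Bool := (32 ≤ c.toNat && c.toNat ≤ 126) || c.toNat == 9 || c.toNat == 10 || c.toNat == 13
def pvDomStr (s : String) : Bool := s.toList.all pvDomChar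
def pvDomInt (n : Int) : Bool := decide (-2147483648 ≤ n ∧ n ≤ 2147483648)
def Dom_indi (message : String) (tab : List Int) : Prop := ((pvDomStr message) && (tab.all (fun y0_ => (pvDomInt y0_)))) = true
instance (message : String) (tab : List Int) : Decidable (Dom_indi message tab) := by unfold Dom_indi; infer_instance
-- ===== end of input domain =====

-- B replaces A's repeated whole-list re-summing and one-by-one decrements with a single
-- running sum and a one-step overshoot subtraction (A mutates the caller's list in place,
-- B returns a fresh list; the equivalence proved here is about the return value).

-- ===== PORT A =====
-- `tab[-1] -= 1` on a nonempty list: decrement the last element.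
def decLast : List Int → List Int
  | [] => []
  | [x] => [x - 1]
  | x :: y :: xs => x :: decLast (y :: xs)

theorem decLast_sum (xs : List Int) (h : xs ≠ []) : (decLast xs).sum = xs.sum - 1 := by
  induction xs with
  | nil => simp at h
  | cons a t ih =>
    cases t with
    | nil => simp [decLast]
    | cons b u => simp [decLast, ih (by simp)]; ring

-- first while loop: `while sum(tab) < len(message): tab.append(i); i += 1`
def indiLoop1 (L : Int) (tab : List Int) (i : Int) (hi : 1 ≤ i) : List Int :=
  if _h : tab.sum < L then indiLoop1 L (tab ++ [i]) (i + 1) (by omega) else tab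
termination_by (L - tab.sum).toNat
decreasing_by simp [List.sum_append]; omega

-- second while loop: `while sum(tab) > len(message): tab[-1] -= 1`
-- (0 ≤ L always holds, L = len(message); it guarantees the list stays nonempty, hence termination)
def indiLoop2 (L : Int) (hL : 0 ≤ L) (tab : List Int) : List Int :=
  if _h : L < tab.sum then indiLoop2 L hL (decLast tab) else tab
termination_by (tab.sum - L).toNat
decreasing_by
  have hne : tab ≠ [] := by rintro rfl; simp at _h; omega
  rw [decLast_sum tab hne]; omega

def indi (message : String) (tab : List Int) : List Int :=
  indiLoop2 (PySem.Str.len message) (by simp) (indiLoop1 (PySem.Str.len message) tab 1 (by norm_num))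

-- ===== PORT B =====
-- `res[-1] -= v` of Source B (the [] case is unreachable there: res = [] forces s = 0 ≤ L)
def subLast (v : Int) : List Int → List Int
  | [] => []
  | [x] => [x - v]
  | x :: y :: xs => x :: subLast v (y :: xs)

-- `while s < L: k += 1; s += k`, returning the final (s, k)
def altLoop (L s k : Int) (hk : 0 ≤ k) : Int × Int :=
  if _h : s < L then altLoop L (s + (k + 1)) (k + 1) (by omega) else (s, k)
termination_by (L - s).toNat
decreasing_by omega

def indi_alt (message : String) (tab : List Int) : List Int :=
  let L : Int := PySem.Str.len message
  let s0 : Int := tab.sum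
  let sk := altLoop L s0 0 (by norm_num)
  let res := tab ++ PySem.List.pyRange 1 (sk.2 + 1) 1
  if L < sk.1 then subLast (sk.1 - L) res else res

-- ===== PRECONDITION & SPEC =====
def Spec_indi (message : String) (tab : List Int) (out : List Int) : Prop := out = indi_alt message tab
instance (message : String) (tab : List Int) (out : List Int) : Decidable (Spec_indi message tab out) := by unfold Spec_indi; infer_instance

-- ===== CLAIM (what is proved, stated in full; the proofs are below) =====
def Claim_equal_indi : Prop := ∀ (message : String) (tab : List Int), Dom_indi message tab → Spec_indi message tab (indi message tab)

-- ===== LEMMAS AND PROOFS =====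

theorem subLast_eq (v : Int) (xs : List Int) (h : xs ≠ []) :
    subLast v xs = xs.dropLast ++ [xs.getLast h - v] := by
  induction xs with
  | nil => simp at h
  | cons a t ih =>
    cases t with
    | nil => simp [subLast]
    | cons b u =>
      simp only [subLast, ih (by simp), List.dropLast_cons_of_ne_nil (by simp : b :: u ≠ []),
        List.getLast_cons (by simp : b :: u ≠ []), List.cons_append]

theorem subLast_one (xs : List Int) : subLast 1 xs = decLast xs := by
  induction xs with
  | nil => rfl
  | cons a t ih =>
    cases t with
    | nil => rfl
    | cons b u => simp [subLast, decLast] at ih ⊢; exact ih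

theorem subLast_subLast (m n : Int) (xs : List Int) (h : xs ≠ []) :
    subLast m (subLast n xs) = subLast (m + n) xs := by
  rw [subLast_eq n xs h]
  rw [subLast_eq m _ (by simp)]
  rw [subLast_eq (m + n) xs h]
  rw [List.dropLast_concat, List.getLast_concat]
  congr 1
  simp only [List.cons.injEq, and_true]
  ring

theorem altLoop_snd_ge (L : Int) :
    ∀ (n : ℕ) (s k : Int) (hk : 0 ≤ k), (L - s).toNat = n → k ≤ (altLoop L s k hk).2 := by
  intro n
  induction n using Nat.strong_induction_on with
  | _ n ih =>
    intro s k hk hn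
    rw [altLoop]
    by_cases h : s < L
    · simp only [dif_pos h]
      have := ih (L - (s + (k + 1))).toNat (by omega) (s + (k + 1)) (k + 1) (by omega) rfl
      omega
    · simp only [dif_neg h]
      exact le_rfl

-- loop1 matches altLoop: same guard, altLoop tracks the running sum, loop1 appends k+1, k+2, …
theorem loop1_altLoop (L : Int) :
    ∀ (n : ℕ) (tab : List Int) (k : Int) (hk : 0 ≤ k), (L - tab.sum).toNat = n →
      indiLoop1 L tab (k + 1) (by omega) =
        tab ++ PySem.List.pyRange (k + 1) ((altLoop L tab.sum k hk).2 + 1) 1 ∧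
      (indiLoop1 L tab (k + 1) (by omega)).sum = (altLoop L tab.sum k hk).1 := by
  intro n
  induction n using Nat.strong_induction_on with
  | _ n ih =>
    intro tab k hk hn
    rw [indiLoop1, altLoop]
    by_cases h : tab.sum < L
    · simp only [dif_pos h]
      have hs : (tab ++ [k + 1]).sum = tab.sum + (k + 1) := by simp [List.sum_append]
      have hlt : (L - (tab ++ [k + 1]).sum).toNat < n := by rw [hs]; omega
      have hih := ih _ hlt (tab ++ [k + 1]) (k + 1) (by omega) rfl
      rw [hs] at hih
      obtain ⟨h1, h2⟩ := hih
      have hK : k + 1 ≤ (altLoop L (tab.sum + (k + 1)) (k + 1) (by omega)).2 :=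
        altLoop_snd_ge L _ _ _ _ rfl
      constructor
      · rw [h1, List.append_assoc]
        congr 1
        rw [PySem.List.pyRange_one_cons
          (show k + 1 < (altLoop L (tab.sum + (k + 1)) (k + 1) (by omega)).2 + 1 by omega)]
        rfl
      · exact h2
    · simp only [dif_neg h]
      constructor
      · rw [PySem.List.pyRange_one_eq_nil (by omega), List.append_nil]
      · trivial

-- loop2 equals the one-step overshoot subtraction
theorem loop2_subLast (L : Int) (hL : 0 ≤ L) :
    ∀ (n : ℕ) (tab : List Int), (tab.sum - L).toNat = n →
      indiLoop2 L hL tab = if L < tab.sum then subLast (tab.sum - L) tab else tab := by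
  intro n
  induction n using Nat.strong_induction_on with
  | _ n ih =>
    intro tab hn
    rw [indiLoop2]
    by_cases h : L < tab.sum
    · simp only [dif_pos h, if_pos h]
      have hne : tab ≠ [] := by rintro rfl; simp at h; omega
      have hsum := decLast_sum tab hne
      have hlt : ((decLast tab).sum - L).toNat < n := by omega
      rw [ih _ hlt (decLast tab) rfl, hsum]
      by_cases h2 : L < tab.sum - 1
      · rw [if_pos h2, ← subLast_one, subLast_subLast _ _ _ hne]
        congr 1; ring
      · rw [if_neg h2, ← subLast_one]
        have : tab.sum - L = 1 := by omega
        rw [this]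
    · simp only [dif_neg h, if_neg h]

-- ===== VERDICT (by name: the statement is the Claim_ definition above) =====
theorem indi_spec : Claim_equal_indi := by
  intro message tab _hdom
  unfold Spec_indi indi indi_alt
  obtain ⟨h1, h2⟩ := loop1_altLoop (PySem.Str.len message)
      (PySem.Str.len message - tab.sum).toNat tab 0 (by norm_num) rfl
  simp only [zero_add] at h1 h2
  rw [loop2_subLast (PySem.Str.len message) (by simp) _ _ rfl, h2, h1]
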